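-- pv_equiv track=rewrite | github.com/DerflaNehc/PythonPractice | moduloArrayProblem.py | minlengthsb
-- ===== SOURCE A (Python) =====
-- from typing import List
--
-- def minlengthsb(arr:List[int],k:int)->int:
--     # if prefix[end]%3==prefix[start-1]%3 then array[start,end]%3==0
--     n = len(arr)
--     minlen = n + 1
--     dict_mod = {0:-1} #this value avoids edge cases
--     current_sum = 0
--     #check for every end, if prefix[end]%3==prefix[start-1]%3
--     for i in range(n):
--         #distributive property of modulo
--         current_sum = (current_sum + arr[i])%k
--         if current_sum in dict_mod:
--             len_temp = i - dict_mod[current_sum]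
--             dict_mod[current_sum] = i
--             if len_temp < minlen:
--                 minlen = len_temp
--     return minlen
-- ===== SOURCE B (Python) =====
-- from typing import List
--
-- def minlengthsb(arr: List[int], k: int) -> int:
--     # collect positions where the running prefix sum is 0 mod k, then take the min gap
--     zeros = [-1]
--     s = 0
--     for i, x in enumerate(arr):
--         s = (s + x) % k
--         if s == 0:
--             zeros.append(i)
--     minlen = len(arr) + 1
--     for a, b in zip(zeros, zeros[1:]):
--         minlen = min(minlen, b - a)
--     return minlen
-- ===== Notes on version B (the rewrite author's own statement) =====
-- stated objective: alternative
-- what changed: Replaces A's online pass that maintains a dict of last residue positions with a two-phase decomposition: first collect (with a -1 sentinel) all indices where the running prefix sum is 0 mod k, then take the minimum gap between adjacent collected positions.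
import Mathlib
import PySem

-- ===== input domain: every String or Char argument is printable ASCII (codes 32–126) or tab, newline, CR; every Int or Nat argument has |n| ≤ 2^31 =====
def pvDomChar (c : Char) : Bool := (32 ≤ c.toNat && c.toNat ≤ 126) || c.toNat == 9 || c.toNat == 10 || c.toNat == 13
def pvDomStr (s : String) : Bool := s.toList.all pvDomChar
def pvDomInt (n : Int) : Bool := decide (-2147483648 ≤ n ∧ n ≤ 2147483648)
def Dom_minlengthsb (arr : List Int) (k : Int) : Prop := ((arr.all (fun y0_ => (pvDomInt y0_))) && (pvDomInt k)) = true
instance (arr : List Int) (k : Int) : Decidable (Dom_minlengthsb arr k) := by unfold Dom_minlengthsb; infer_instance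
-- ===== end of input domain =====

-- B replaces A's online dict-tracking pass by a collect-positions-then-min-over-gaps decomposition (objective: alternative).

-- ===== PORT A =====
-- state = (minlen, dict_mod, current_sum); loop over enumerate(arr) mirrors 'for i in range(n)'
def minlengthsb (arr : List Int) (k : Int) : Int :=
  let n : Int := PySem.List.len arr
  let st := (PySem.List.enumerate arr).foldl
    (fun (st : Int × PySem.Dict Int Int × Int) (p : Int × Int) =>
      let s' := PySem.Int.mod (st.2.2 + p.2) k
      if st.2.1.contains s' then
        let lenTemp := p.1 - st.2.1.getD s' 0
        let d' := st.2.1.insert s' p.1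
        ((if lenTemp < st.1 then lenTemp else st.1), d', s')
      else (st.1, st.2.1, s'))
    (n + 1, PySem.Dict.empty.insert 0 (-1), 0)
  st.1

-- ===== PORT B =====
def minlengthsb_alt (arr : List Int) (k : Int) : Int :=
  let st := (PySem.List.enumerate arr).foldl
    (fun (st : List Int × Int) (p : Int × Int) =>
      let s' := PySem.Int.mod (st.2 + p.2) k
      if s' = 0 then (st.1 ++ [p.1], s') else (st.1, s'))
    ([-1], 0)
  let zeros := st.1
  (zeros.zip (zeros.drop 1)).foldl (fun m ab => min m (ab.2 - ab.1)) (PySem.List.len arr + 1)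

-- ===== PRECONDITION & SPEC =====
-- Pre_ excludes only inputs where A raises ZeroDivisionError: k = 0 with a non-empty arr.
def Pre_minlengthsb (arr : List Int) (k : Int) : Prop := arr = [] ∨ k ≠ 0
instance (arr : List Int) (k : Int) : Decidable (Pre_minlengthsb arr k) := by unfold Pre_minlengthsb; infer_instance
def pvWitness_minlengthsb : List Int × Int := ([2, 1, 3], 3)

def Spec_minlengthsb (arr : List Int) (k : Int) (out : Int) : Prop := out = minlengthsb_alt arr k
instance (arr : List Int) (k : Int) (out : Int) : Decidable (Spec_minlengthsb arr k out) := by unfold Spec_minlengthsb; infer_instance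

-- ===== CLAIM (what is proved, stated in full; the proofs are below) =====
def Claim_equal_minlengthsb : Prop := ∀ (arr : List Int) (k : Int), Dom_minlengthsb arr k → Pre_minlengthsb arr k → Spec_minlengthsb arr k (minlengthsb arr k)

-- ===== LEMMAS AND PROOFS =====

-- A's loop body and B's two phases, abstracted over the enumerated pair list
def aStep (k : Int) (st : Int × PySem.Dict Int Int × Int) (p : Int × Int) : Int × PySem.Dict Int Int × Int :=
  let s' := PySem.Int.mod (st.2.2 + p.2) k
  if st.2.1.contains s' then
    let lenTemp := p.1 - st.2.1.getD s' 0
    let d' := st.2.1.insert s' p.1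
    ((if lenTemp < st.1 then lenTemp else st.1), d', s')
  else (st.1, st.2.1, s')

def zerosF (k : Int) : List (Int × Int) → Int → List Int
  | [], _ => []
  | p :: r, s =>
      let s' := PySem.Int.mod (s + p.2) k
      if s' = 0 then p.1 :: zerosF k r s' else zerosF k r s'

def gapfold (m : Int) (zs : List Int) : Int :=
  (zs.zip (zs.drop 1)).foldl (fun m ab => min m (ab.2 - ab.1)) m

lemma gapfold_cons_cons (m a b : Int) (t : List Int) :
    gapfold m (a :: b :: t) = gapfold (min m (b - a)) (b :: t) := rfl

lemma bStep_zeros (k : Int) (ps : List (Int × Int)) (zs : List Int) (s : Int) :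
    ps.foldl (fun (st : List Int × Int) (p : Int × Int) =>
        let s' := PySem.Int.mod (st.2 + p.2) k
        if s' = 0 then (st.1 ++ [p.1], s') else (st.1, s')) (zs, s)
      = (zs ++ zerosF k ps s,
         ps.foldl (fun (s : Int) (p : Int × Int) => PySem.Int.mod (s + p.2) k) s) := by
  induction ps generalizing zs s with
  | nil => simp [zerosF]
  | cons p r ih =>
      simp only [List.foldl_cons, zerosF]
      by_cases h : PySem.Int.mod (s + p.2) k = 0 <;> simp [h, ih]

lemma min_eq_if (m t : Int) : (if t < m then t else m) = min m t := by
  simp only [min_def]; split_ifs <;> omega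

lemma main_inv (k : Int) (ps : List (Int × Int)) (s last m : Int) :
    (ps.foldl (aStep k) (m, PySem.Dict.empty.insert 0 last, s)).1
      = gapfold m (last :: zerosF k ps s) := by
  induction ps generalizing s last m with
  | nil => simp [zerosF, gapfold]
  | cons p r ih =>
      simp only [List.foldl_cons, zerosF]
      have hc : (PySem.Dict.empty.insert 0 last).contains (PySem.Int.mod (s + p.2) k)
          = decide (PySem.Int.mod (s + p.2) k = 0) := by
        by_cases h : PySem.Int.mod (s + p.2) k = 0 <;>
          simp [h, PySem.Dict.contains_insert, PySem.Dict.contains_empty]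
      by_cases h : PySem.Int.mod (s + p.2) k = 0
      · have hstep : aStep k (m, PySem.Dict.empty.insert 0 last, s) p
            = ((if p.1 - last < m then p.1 - last else m),
               PySem.Dict.empty.insert 0 p.1, PySem.Int.mod (s + p.2) k) := by
          simp only [aStep, h]
          simp [PySem.Dict.getD_insert_self, PySem.Dict.insert_insert_self]
        rw [hstep, h, ih]
        simp only [if_true]
        rw [gapfold_cons_cons, min_eq_if]
      · have hstep : aStep k (m, PySem.Dict.empty.insert 0 last, s) p
            = (m, PySem.Dict.empty.insert 0 last, PySem.Int.mod (s + p.2) k) := by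
          simp only [aStep, hc, h]
          simp
        rw [hstep, ih]
        simp [h]

-- ===== VERDICT (by name: the statement is the Claim_ definition above) =====
theorem minlengthsb_spec : Claim_equal_minlengthsb := by
  intro arr k _ _
  unfold Spec_minlengthsb minlengthsb minlengthsb_alt
  simp only
  rw [show (fun (st : Int × PySem.Dict Int Int × Int) (p : Int × Int) =>
        let s' := PySem.Int.mod (st.2.2 + p.2) k
        if st.2.1.contains s' then
          let lenTemp := p.1 - st.2.1.getD s' 0
          let d' := st.2.1.insert s' p.1
          ((if lenTemp < st.1 then lenTemp else st.1), d', s')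
        else (st.1, st.2.1, s')) = aStep k from rfl]
  rw [main_inv, bStep_zeros]
  rfl
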